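-- pv_equiv track=rewrite | github.com/tozh/python-playground | leetcode/unique_topological_sort.py | buildGrpah
-- ===== SOURCE A (Python) =====
-- def buildGrpah(org, seqs):
--     indegree = {i: 0 for i in org}
--     outedges = {i: [] for i in org}
--
--     for seq in seqs:
--         for i in range(1, len(seq)):
--             s1 = seq[i - 1]
--             s2 = seq[i]
--             indegree[s2] += 1
--             outedges[s1].append(s2)
--
--     return indegree, outedges
-- ===== SOURCE B (Python) =====
-- def buildGrpah(org, seqs):
--     # Node-major: for each node of org, scan seqs once to compute its own
--     # indegree count and successor list (edge-major loop of A eliminated).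
--     indegree = {}
--     outedges = {}
--     for node in org:
--         deg = 0
--         succ = []
--         for seq in seqs:
--             for j in range(1, len(seq)):
--                 if seq[j] == node:
--                     deg += 1
--                 if seq[j - 1] == node:
--                     succ.append(seq[j])
--         indegree[node] = deg
--         outedges[node] = succ
--     return indegree, outedges
-- ===== Notes on version B (the rewrite author's own statement) =====
-- stated objective: alternative
-- what changed: A is edge-major (one pass over all adjacent pairs, updating both dicts in place); B is node-major: for each node of org it scans seqs to count that node's incoming occurrences and collect its successor list, so the dicts are built key by key with no in-place updates.
import Mathlib
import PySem

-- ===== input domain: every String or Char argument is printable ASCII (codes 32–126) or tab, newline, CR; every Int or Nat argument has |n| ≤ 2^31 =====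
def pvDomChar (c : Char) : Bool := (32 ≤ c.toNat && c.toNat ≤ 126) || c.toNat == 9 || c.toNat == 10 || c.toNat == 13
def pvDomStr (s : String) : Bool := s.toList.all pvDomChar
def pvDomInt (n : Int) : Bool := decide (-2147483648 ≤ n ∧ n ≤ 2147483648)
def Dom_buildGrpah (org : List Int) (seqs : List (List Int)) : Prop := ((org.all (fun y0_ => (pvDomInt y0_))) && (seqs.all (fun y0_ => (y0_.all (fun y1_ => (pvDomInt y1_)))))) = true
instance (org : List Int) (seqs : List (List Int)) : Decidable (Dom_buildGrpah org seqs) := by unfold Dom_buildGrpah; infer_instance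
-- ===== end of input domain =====

-- B replaces A's edge-major in-place update loop by a node-major scan: per node of org it
-- counts incoming occurrences and collects successors directly (objective: alternative).

-- ===== PORT A =====
def buildGrpah (org : List Int) (seqs : List (List Int)) :
    (List (Int × Int)) × (List (Int × List Int)) :=
  let indegree : PySem.Dict Int Int := org.foldl (fun d i => d.insert i 0) PySem.Dict.empty
  let outedges : PySem.Dict Int (List Int) := org.foldl (fun d i => d.insert i []) PySem.Dict.empty
  let st := seqs.foldl (fun st seq =>
    (PySem.List.pyRange 1 (seq.length : Int) 1).foldl (fun st i =>
      let s1 := PySem.List.pyGetD seq (i - 1) 0   -- in range for every i of the range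
      let s2 := PySem.List.pyGetD seq i 0
      (st.1.modify s2 0 (· + 1), st.2.modify s1 [] (· ++ [s2]))) st) (indegree, outedges)
  (st.1.items, st.2.items)

-- ===== PORT B =====
def buildGrpah_alt (org : List Int) (seqs : List (List Int)) :
    (List (Int × Int)) × (List (Int × List Int)) :=
  let st := org.foldl (fun (st : PySem.Dict Int Int × PySem.Dict Int (List Int)) node =>
    let ds := seqs.foldl (fun ds seq =>
      (PySem.List.pyRange 1 (seq.length : Int) 1).foldl (fun (ds : Int × List Int) j =>
        let ds := if PySem.List.pyGetD seq j 0 == node then (ds.1 + 1, ds.2) else ds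
        if PySem.List.pyGetD seq (j - 1) 0 == node then (ds.1, ds.2 ++ [PySem.List.pyGetD seq j 0]) else ds)
        ds) ((0 : Int), ([] : List Int))
    (st.1.insert node ds.1, st.2.insert node ds.2))
    (PySem.Dict.empty, PySem.Dict.empty)
  (st.1.items, st.2.items)

-- ===== PRECONDITION & SPEC =====
-- Pre_ excludes exactly the inputs where Python A raises KeyError: some element of a
-- sequence of length ≥ 2 is missing from org (every such element is looked up as s1 or s2).
def Pre_buildGrpah (org : List Int) (seqs : List (List Int)) : Prop :=
  ∀ seq ∈ seqs, 2 ≤ seq.length → ∀ x ∈ seq, x ∈ org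
instance (org : List Int) (seqs : List (List Int)) : Decidable (Pre_buildGrpah org seqs) := by
  unfold Pre_buildGrpah; infer_instance
def pvWitness_buildGrpah : List Int × List (List Int) := ([1, 2], [[1, 2], [2]])

def Spec_buildGrpah (org : List Int) (seqs : List (List Int))
    (out : (List (Int × Int)) × (List (Int × List Int))) : Prop := out = buildGrpah_alt org seqs
instance (org : List Int) (seqs : List (List Int)) (out : (List (Int × Int)) × (List (Int × List Int))) :
    Decidable (Spec_buildGrpah org seqs out) := by unfold Spec_buildGrpah; infer_instance

-- ===== CLAIM (what is proved, stated in full; the proofs are below) =====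
def Claim_equal_buildGrpah : Prop := ∀ (org : List Int) (seqs : List (List Int)),
  Dom_buildGrpah org seqs → Pre_buildGrpah org seqs → Spec_buildGrpah org seqs (buildGrpah org seqs)
-- ===== LEMMAS AND PROOFS =====

-- A's index loop over range(1, len(seq)) reads exactly the adjacent pairs zip(seq, seq[1:]).
lemma range_pairs (xs : List Int) :
    (PySem.List.pyRange 1 (xs.length : Int) 1).map
      (fun i => (PySem.List.pyGetD xs (i - 1) 0, PySem.List.pyGetD xs i 0)) = xs.zip xs.tail := by
  rw [PySem.List.pyRange_of_pos 1 (xs.length : Int) (by norm_num), List.map_map]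
  apply List.ext_getElem
  · simp only [List.length_map, List.length_range, List.length_zip, List.length_tail]
    split_ifs with h <;> omega
  · intro j hj1 hj2
    simp only [List.length_zip, List.length_tail] at hj2
    have hj' : j + 1 < xs.length := by omega
    simp only [List.getElem_map, List.getElem_range, Function.comp_apply, List.getElem_zip,
      List.getElem_tail]
    have h1 : (1 : Int) + 1 * (j : Int) - 1 = ((j : Nat) : Int) := by ring
    have h2 : (1 : Int) + 1 * (j : Int) = (((j + 1 : Nat) : Int)) := by push_cast; ring
    rw [h1, h2, PySem.List.pyGetD_natCast, PySem.List.pyGetD_natCast,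
      List.getD_eq_getElem xs 0 (by omega), List.getD_eq_getElem xs 0 hj']

-- getD after a loop of inserts whose value depends only on the key.
lemma getD_foldl_insert_fun {ν : Type} (l : List Int) (v : Int → ν) (d : PySem.Dict Int ν)
    (k : Int) (dflt : ν) :
    (l.foldl (fun d i => d.insert i (v i)) d).getD k dflt =
      if k ∈ l then v k else d.getD k dflt := by
  induction l generalizing d with
  | nil => simp
  | cons i t ih =>
      rw [List.foldl_cons, ih]
      by_cases ht : k ∈ t
      · simp [ht]
      · by_cases hk : k = i
        · subst hk; simp [ht, PySem.Dict.getD_insert_self]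
        · simp [ht, hk, PySem.Dict.getD_insert_of_ne d (v i) dflt hk]

-- A's fused pair-state loop, split into two independent folds over the flattened edge list.
lemma buildGrpah_eq (org : List Int) (seqs : List (List Int)) :
    buildGrpah org seqs =
      (((seqs.flatMap (fun s => s.zip s.tail)).foldl
          (fun d p => d.modify p.2 0 (· + 1))
          (org.foldl (fun d i => d.insert i 0) PySem.Dict.empty)).items,
       ((seqs.flatMap (fun s => s.zip s.tail)).foldl
          (fun d p => d.modify p.1 [] (· ++ [p.2]))
          (org.foldl (fun d i => d.insert i ([] : List Int)) PySem.Dict.empty)).items) := by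
  unfold buildGrpah
  have hin : ∀ (seq : List Int)
      (st : PySem.Dict Int Int × PySem.Dict Int (List Int)),
      (PySem.List.pyRange 1 (seq.length : Int) 1).foldl (fun st i =>
          (st.1.modify (PySem.List.pyGetD seq i 0) 0 (· + 1),
           st.2.modify (PySem.List.pyGetD seq (i - 1) 0) [] (· ++ [PySem.List.pyGetD seq i 0]))) st =
        (seq.zip seq.tail).foldl (fun st p =>
          (st.1.modify p.2 0 (· + 1), st.2.modify p.1 [] (· ++ [p.2]))) st := by
    intro seq st
    rw [← range_pairs seq, List.foldl_map]
  simp only [hin, ← List.foldl_flatMap]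
  rw [PySem.List.foldl_prod_mk
    (f := fun (d : PySem.Dict Int Int) (p : Int × Int) => d.modify p.2 0 (· + 1))
    (g := fun (d : PySem.Dict Int (List Int)) (p : Int × Int) => d.modify p.1 [] (· ++ [p.2]))
    (l := seqs.flatMap (fun s => s.zip s.tail))]

-- B's per-node inner scan, expressed over the flattened edge list: a countP and a filter-map.
lemma alt_inner_eq (seqs : List (List Int)) (node : Int) :
    (seqs.foldl (fun ds seq =>
      (PySem.List.pyRange 1 (seq.length : Int) 1).foldl (fun (ds : Int × List Int) j =>
        let ds := if PySem.List.pyGetD seq j 0 == node then (ds.1 + 1, ds.2) else ds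
        if PySem.List.pyGetD seq (j - 1) 0 == node then (ds.1, ds.2 ++ [PySem.List.pyGetD seq j 0]) else ds)
        ds) ((0 : Int), ([] : List Int))) =
    ((((seqs.flatMap (fun s => s.zip s.tail)).countP (fun p => p.2 == node) : Nat) : Int),
     ((seqs.flatMap (fun s => s.zip s.tail)).filter (fun p => p.1 == node)).map (·.2)) := by
  have hin : ∀ (seq : List Int) (ds : Int × List Int),
      (PySem.List.pyRange 1 (seq.length : Int) 1).foldl (fun (ds : Int × List Int) j =>
        let ds := if PySem.List.pyGetD seq j 0 == node then (ds.1 + 1, ds.2) else ds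
        if PySem.List.pyGetD seq (j - 1) 0 == node then (ds.1, ds.2 ++ [PySem.List.pyGetD seq j 0]) else ds)
        ds =
      (seq.zip seq.tail).foldl (fun (ds : Int × List Int) p =>
        (if p.2 == node then ds.1 + 1 else ds.1,
         if p.1 == node then ds.2 ++ [p.2] else ds.2)) ds := by
    intro seq ds
    rw [← range_pairs seq, List.foldl_map]
    congr 1
    funext ds j
    by_cases h2 : PySem.List.pyGetD seq j 0 == node <;>
      by_cases h1 : PySem.List.pyGetD seq (j - 1) 0 == node <;> simp [h1, h2]
  simp only [hin, ← List.foldl_flatMap]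
  rw [PySem.List.foldl_prod_mk
    (f := fun (n : Int) (p : Int × Int) => if p.2 == node then n + 1 else n)
    (g := fun (l : List Int) (p : Int × Int) => if p.1 == node then l ++ [p.2] else l)
    (l := seqs.flatMap (fun s => s.zip s.tail))]
  rw [PySem.List.foldl_count_if, PySem.List.foldl_append_if]
  simp

-- B as two key-by-key insert folds whose values are functions of the key alone.
lemma buildGrpah_alt_eq (org : List Int) (seqs : List (List Int)) :
    buildGrpah_alt org seqs =
      ((org.foldl (fun d k =>
          d.insert k (((seqs.flatMap (fun s => s.zip s.tail)).countP (fun p => p.2 == k) : Nat) : Int))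
          PySem.Dict.empty).items,
       (org.foldl (fun d k =>
          d.insert k (((seqs.flatMap (fun s => s.zip s.tail)).filter (fun p => p.1 == k)).map (·.2)))
          PySem.Dict.empty).items) := by
  unfold buildGrpah_alt
  simp only [alt_inner_eq]
  rw [PySem.List.foldl_prod_mk
    (f := fun (d : PySem.Dict Int Int) (k : Int) =>
      d.insert k (((seqs.flatMap (fun s => s.zip s.tail)).countP (fun p => p.2 == k) : Nat) : Int))
    (g := fun (d : PySem.Dict Int (List Int)) (k : Int) =>
      d.insert k (((seqs.flatMap (fun s => s.zip s.tail)).filter (fun p => p.1 == k)).map (·.2)))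
    (l := org)]

lemma keys_init {ν : Type} (org : List Int) (v : Int → ν) :
    (org.foldl (fun d i => d.insert i (v i)) (PySem.Dict.empty : PySem.Dict Int ν)).keys =
      PySem.Set.ofList org := by
  rw [PySem.Dict.keys_foldl_insert org (fun _ i => v i) PySem.Dict.empty, PySem.Dict.keys_empty,
    PySem.Set.update_nil_left]

-- keys of a modify fold whose keys all come from org stay Set.ofList org
lemma keys_modify_fold {ν : Type} (org : List Int) (l : List (Int × Int)) (key : Int × Int → Int)
    (d0 : ν) (f : Int × Int → ν → ν) (v : Int → ν)
    (hmem : ∀ p ∈ l, key p ∈ org) :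
    ((l.foldl (fun d p => d.modify (key p) d0 (f p))
        (org.foldl (fun d i => d.insert i (v i)) PySem.Dict.empty)).keys) =
      PySem.Set.ofList org := by
  rw [PySem.Dict.keys_foldl_modify_key, keys_init, PySem.Set.update_eq_append_filter]
  have : (PySem.Set.ofList (l.map key)).filter
      (fun y => !(PySem.Set.contains (PySem.Set.ofList org) y)) = [] := by
    rw [List.filter_eq_nil_iff]
    intro y hy
    rcases List.mem_map.mp ((PySem.Set.mem_ofList _ _).mp hy) with ⟨p, hp, rfl⟩
    simpa using hmem p hp
  rw [this, List.append_nil]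

-- ===== VERDICT helpers: pointwise equality of the two pairs of dicts =====
lemma items_fst_eq (org : List Int) (seqs : List (List Int))
    (hpre : Pre_buildGrpah org seqs) :
    ((seqs.flatMap (fun s => s.zip s.tail)).foldl (fun d p => d.modify p.2 0 (· + 1))
        (org.foldl (fun d i => d.insert i 0) PySem.Dict.empty)).items =
      (org.foldl (fun d k =>
          d.insert k (((seqs.flatMap (fun s => s.zip s.tail)).countP (fun p => p.2 == k) : Nat) : Int))
          PySem.Dict.empty).items := by
  have hmem : ∀ p ∈ seqs.flatMap (fun s => s.zip s.tail), p.2 ∈ org := by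
    intro p hp
    rcases List.mem_flatMap.mp hp with ⟨seq, hseq, hpz⟩
    have hlen : 2 ≤ seq.length := by
      cases seq with
      | nil => simp at hpz
      | cons a t => cases t with
        | nil => simp at hpz
        | cons b u => simp
    exact hpre seq hseq hlen p.2 (List.mem_of_mem_tail (List.of_mem_zip hpz).2)
  have hkA := keys_modify_fold org (seqs.flatMap (fun s => s.zip s.tail)) (·.2) 0
    (fun _ n => n + 1) (fun _ => (0 : Int)) hmem
  have hkB := keys_init org
    (fun k => (((seqs.flatMap (fun s => s.zip s.tail)).countP (fun p => p.2 == k) : Nat) : Int))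
  rw [PySem.Dict.items_eq_map_keys _ (by rw [hkA]; exact PySem.Set.nodup_ofList _) 0,
    PySem.Dict.items_eq_map_keys _ (by rw [hkB]; exact PySem.Set.nodup_ofList _) 0, hkA, hkB]
  apply List.map_congr_left
  intro k hk
  have hko : k ∈ org := (PySem.Set.mem_ofList _ _).mp hk
  have hfold : (seqs.flatMap (fun s => s.zip s.tail)).foldl (fun d p => d.modify p.2 0 (· + 1))
      (org.foldl (fun d i => d.insert i (0 : Int)) PySem.Dict.empty) =
      ((seqs.flatMap (fun s => s.zip s.tail)).map (·.2)).foldl (fun d x => d.modify x 0 (· + 1))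
        (org.foldl (fun d i => d.insert i 0) PySem.Dict.empty) := by
    rw [List.foldl_map]
  rw [hfold, PySem.Dict.getD_foldl_modify_add_one,
    getD_foldl_insert_fun org (fun _ => (0 : Int)),
    getD_foldl_insert_fun org
      (fun k => (((seqs.flatMap (fun s => s.zip s.tail)).countP (fun p => p.2 == k) : Nat) : Int)),
    if_pos hko, if_pos hko]
  rw [List.count_eq_countP, List.countP_map]
  simp [Function.comp_def, zero_add]

lemma items_snd_eq (org : List Int) (seqs : List (List Int))
    (hpre : Pre_buildGrpah org seqs) :
    ((seqs.flatMap (fun s => s.zip s.tail)).foldl (fun d p => d.modify p.1 [] (· ++ [p.2]))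
        (org.foldl (fun d i => d.insert i ([] : List Int)) PySem.Dict.empty)).items =
      (org.foldl (fun d k =>
          d.insert k (((seqs.flatMap (fun s => s.zip s.tail)).filter (fun p => p.1 == k)).map (·.2)))
          PySem.Dict.empty).items := by
  have hmem : ∀ p ∈ seqs.flatMap (fun s => s.zip s.tail), p.1 ∈ org := by
    intro p hp
    rcases List.mem_flatMap.mp hp with ⟨seq, hseq, hpz⟩
    have hlen : 2 ≤ seq.length := by
      cases seq with
      | nil => simp at hpz
      | cons a t => cases t with
        | nil => simp at hpz
        | cons b u => simp
    exact hpre seq hseq hlen p.1 (List.of_mem_zip hpz).1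
  have hkA' := keys_modify_fold org (seqs.flatMap (fun s => s.zip s.tail)) (·.1) ([] : List Int)
    (fun p l => l ++ [p.2]) (fun _ => ([] : List Int)) hmem
  have hkB := keys_init org
    (fun k => ((seqs.flatMap (fun s => s.zip s.tail)).filter (fun p => p.1 == k)).map (·.2))
  rw [PySem.Dict.items_eq_map_keys _ (by rw [hkA']; exact PySem.Set.nodup_ofList _) [],
    PySem.Dict.items_eq_map_keys _ (by rw [hkB]; exact PySem.Set.nodup_ofList _) [], hkA', hkB]
  apply List.map_congr_left
  intro k hk
  have hko : k ∈ org := (PySem.Set.mem_ofList _ _).mp hk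
  rw [PySem.Dict.getD_foldl_modify_append,
    getD_foldl_insert_fun org (fun _ => ([] : List Int)),
    getD_foldl_insert_fun org
      (fun k => ((seqs.flatMap (fun s => s.zip s.tail)).filter (fun p => p.1 == k)).map (·.2)),
    if_pos hko, if_pos hko]
  simp

-- ===== VERDICT (by name: the statement is the Claim_ definition above) =====
theorem buildGrpah_spec : Claim_equal_buildGrpah := by
  intro org seqs _ hpre
  unfold Spec_buildGrpah
  rw [buildGrpah_eq, buildGrpah_alt_eq]
  exact Prod.ext_iff.mpr ⟨items_fst_eq org seqs hpre, items_snd_eq org seqs hpre⟩
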